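-- pv_equiv track=rewrite | github.com/ayushzenith/CS4610 | coords.py | findGrid
-- ===== SOURCE A (Python) =====
-- def findGrid(board, center):
--   # board: 4 element array, x, y (of bottom left corner of board), width, height
--   # center: 4 element array, x, y, width, height
--   # returns 3x3 array
--
--   x = board[1]
--   y = board[0]
--   b1 = [x, y, center[1] - x, center[0] - y]
--   x += b1[2]
--   b2 = [x, y, center[3], center[0] - y]
--   x += b2[2]
--   b3 = [x, y, board[1] + board[3] - x, center[0] - y]
--
--   x = board[1]
--   y = center[0]
--   m1 = [x, y, center[1] - x, center[2]]
--   x += m1[2]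
--   m2 = [center[1], center[0], center[3], center[2]]
--   x += m2[2]
--   m3 = [x, y, board[1] + board[3] - x, center[2]]
--
--   x = board[1]
--   y += center[2]
--   t1 = [x, y, center[1] - x, board[0] + board[2] - y]
--   x += t1[2]
--   t2 = [x, y, center[3], board[0] + board[2] - y]
--   x += t2[2]
--   t3 = [x, y, board[1] + board[3] - x, board[0] + board[2] - y]
--
--   grid = [[t1, t2, t3],
--           [m1, m2, m3],
--           [b1, b2, b3]]
--   corners = [
--     [[], [], []],
--     [[], [], []],
--     [[], [], []],
--   ]
--   for i, r in enumerate(grid):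
--     for j, sq in enumerate(r):
--       corners[i][j] = [(sq[0], sq[1]), (sq[0] + sq[2], sq[1] + sq[3])]
--   return grid, corners
-- ===== SOURCE B (Python) =====
-- def findGrid(board, center):
--   # x-boundaries (second coordinate) and y-boundaries (first coordinate)
--   xs = [board[1], center[1], center[1] + center[3], board[1] + board[3]]
--   ys = [board[0], center[0], center[0] + center[2], board[0] + board[2]]
--   grid = [[[xs[j], ys[2 - i], xs[j + 1] - xs[j], ys[3 - i] - ys[2 - i]]
--            for j in range(3)] for i in range(3)]
--   corners = [[[(xs[j], ys[2 - i]), (xs[j + 1], ys[3 - i])]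
--               for j in range(3)] for i in range(3)]
--   return grid, corners
-- ===== Notes on version B (the rewrite author's own statement) =====
-- stated objective: simpler
-- what changed: Replaces the nine hand-unrolled cell assignments and the mutated corners table with two 4-element boundary lists and two nested comprehensions computing each cell and corner pair by index arithmetic.
import Mathlib
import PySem

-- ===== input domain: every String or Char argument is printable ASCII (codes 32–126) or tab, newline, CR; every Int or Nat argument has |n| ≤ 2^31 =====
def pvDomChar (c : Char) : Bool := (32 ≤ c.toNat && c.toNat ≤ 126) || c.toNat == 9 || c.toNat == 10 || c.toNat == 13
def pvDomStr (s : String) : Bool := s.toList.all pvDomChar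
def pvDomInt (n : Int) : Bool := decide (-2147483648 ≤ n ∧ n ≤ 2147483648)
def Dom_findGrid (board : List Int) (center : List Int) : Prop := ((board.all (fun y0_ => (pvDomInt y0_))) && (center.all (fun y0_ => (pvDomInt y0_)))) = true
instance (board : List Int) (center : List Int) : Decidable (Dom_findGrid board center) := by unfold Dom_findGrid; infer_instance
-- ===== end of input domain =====

-- B replaces A's nine hand-unrolled cell assignments with two boundary lists and
-- index arithmetic (objective: simpler). Return-value equivalence on Pre_ (both lists ≥ 4 long).

-- ===== PORT A =====
-- l[i] for a nonnegative literal index; exact under Pre_ (index in range)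
def pvIdx (l : List Int) (i : Int) : Int := PySem.List.pyGetD l i 0

def findGrid (board : List Int) (center : List Int) : List (List (List Int)) × (List (List (List (Int × Int)))) :=
  let x := pvIdx board 1
  let y := pvIdx board 0
  let b1 := [x, y, pvIdx center 1 - x, pvIdx center 0 - y]
  let x := x + pvIdx b1 2
  let b2 := [x, y, pvIdx center 3, pvIdx center 0 - y]
  let x := x + pvIdx b2 2
  let b3 := [x, y, pvIdx board 1 + pvIdx board 3 - x, pvIdx center 0 - y]
  let x := pvIdx board 1
  let y := pvIdx center 0
  let m1 := [x, y, pvIdx center 1 - x, pvIdx center 2]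
  let x := x + pvIdx m1 2
  let m2 := [pvIdx center 1, pvIdx center 0, pvIdx center 3, pvIdx center 2]
  let _x := x + pvIdx m2 2
  let m3 := [_x, y, pvIdx board 1 + pvIdx board 3 - _x, pvIdx center 2]
  let x := pvIdx board 1
  let y := y + pvIdx center 2
  let t1 := [x, y, pvIdx center 1 - x, pvIdx board 0 + pvIdx board 2 - y]
  let x := x + pvIdx t1 2
  let t2 := [x, y, pvIdx center 3, pvIdx board 0 + pvIdx board 2 - y]
  let x := x + pvIdx t2 2
  let t3 := [x, y, pvIdx board 1 + pvIdx board 3 - x, pvIdx board 0 + pvIdx board 2 - y]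
  let grid := [[t1, t2, t3], [m1, m2, m3], [b1, b2, b3]]
  -- the nested enumerate loop fills corners[i][j] from grid[i][j]: a structural map over grid
  let corners := grid.map (fun r => r.map (fun sq =>
    [(pvIdx sq 0, pvIdx sq 1), (pvIdx sq 0 + pvIdx sq 2, pvIdx sq 1 + pvIdx sq 3)]))
  (grid, corners)

-- ===== PORT B =====
def findGrid_alt (board : List Int) (center : List Int) : List (List (List Int)) × (List (List (List (Int × Int)))) :=
  let xs := [pvIdx board 1, pvIdx center 1, pvIdx center 1 + pvIdx center 3, pvIdx board 1 + pvIdx board 3]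
  let ys := [pvIdx board 0, pvIdx center 0, pvIdx center 0 + pvIdx center 2, pvIdx board 0 + pvIdx board 2]
  let grid := (PySem.List.pyRange 0 3 1).map (fun i => (PySem.List.pyRange 0 3 1).map (fun j =>
    [pvIdx xs j, pvIdx ys (2 - i), pvIdx xs (j + 1) - pvIdx xs j, pvIdx ys (3 - i) - pvIdx ys (2 - i)]))
  let corners := (PySem.List.pyRange 0 3 1).map (fun i => (PySem.List.pyRange 0 3 1).map (fun j =>
    [(pvIdx xs j, pvIdx ys (2 - i)), (pvIdx xs (j + 1), pvIdx ys (3 - i))]))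
  (grid, corners)

-- ===== PRECONDITION & SPEC =====
-- Python A raises IndexError when either list has fewer than 4 elements
def Pre_findGrid (board : List Int) (center : List Int) : Prop :=
  4 ≤ board.length ∧ 4 ≤ center.length
instance (board : List Int) (center : List Int) : Decidable (Pre_findGrid board center) := by unfold Pre_findGrid; infer_instance
def pvWitness_findGrid : List Int × List Int := ([0, 0, 9, 9], [2, 3, 4, 5])

def Spec_findGrid (board : List Int) (center : List Int) (out : List (List (List Int)) × (List (List (List (Int × Int))))) : Prop := out = findGrid_alt board center
instance (board : List Int) (center : List Int) (out : List (List (List Int)) × (List (List (List (Int × Int))))) : Decidable (Spec_findGrid board center out) := by unfold Spec_findGrid; infer_instance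

-- ===== CLAIM (what is proved, stated in full; the proofs are below) =====
def Claim_equal_findGrid : Prop := ∀ (board : List Int) (center : List Int), Dom_findGrid board center → Pre_findGrid board center → Spec_findGrid board center (findGrid board center)

-- ===== LEMMAS AND PROOFS =====
lemma pvIdx_zero (a : Int) (l : List Int) : pvIdx (a :: l) 0 = a := by simp [pvIdx, pysem]
lemma pvIdx_one (a b : Int) (l : List Int) : pvIdx (a :: b :: l) 1 = b := by simp [pvIdx, pysem]
lemma pvIdx_two (a b c : Int) (l : List Int) : pvIdx (a :: b :: c :: l) 2 = c := by simp [pvIdx, pysem]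
lemma pvIdx_three (a b c d : Int) (l : List Int) : pvIdx (a :: b :: c :: d :: l) 3 = d := by simp [pvIdx, pysem]

-- ===== VERDICT (by name: the statement is the Claim_ definition above) =====
set_option maxHeartbeats 1000000 in
theorem findGrid_spec : Claim_equal_findGrid := by
  intro board center _ hpre
  obtain ⟨hb, hc⟩ := hpre
  obtain ⟨a0, a1, a2, a3, ar, rfl⟩ : ∃ a0 a1 a2 a3 ar, board = a0 :: a1 :: a2 :: a3 :: ar := by
    match board, hb with
    | a0 :: a1 :: a2 :: a3 :: ar, _ => exact ⟨a0, a1, a2, a3, ar, rfl⟩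
  obtain ⟨c0, c1, c2, c3, cr, rfl⟩ : ∃ c0 c1 c2 c3 cr, center = c0 :: c1 :: c2 :: c3 :: cr := by
    match center, hc with
    | c0 :: c1 :: c2 :: c3 :: cr, _ => exact ⟨c0, c1, c2, c3, cr, rfl⟩
  have h3 : PySem.List.pyRange 0 3 1 = [0, 1, 2] := by decide
  unfold Spec_findGrid findGrid findGrid_alt
  simp only [h3, List.map]
  norm_num [pvIdx_zero, pvIdx_one, pvIdx_two, pvIdx_three]
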